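-- pv_equiv track=rewrite | github.com/kilo5-eng/openclaw-10-codes | 10-88-jpm_dashboard.py | format_options_structure_section
-- ===== SOURCE A (Python) =====
-- from typing import Optional, Dict, Any
--
-- def format_options_structure_section(raw_result: Dict) -> str:
--     """Format 10-77 options structure (gamma walls, max pain, DTE) from raw output."""
--     if not raw_result:
--         return "### Options Structure (10-77)\nMarket closed or no chains available.\n"
--
--     if "error" in raw_result and raw_result["error"]:
--         return f"### Options Structure (10-77)\n[ERROR] {raw_result['error']}\n"
--
--     if "raw_output" not in raw_result or not raw_result["raw_output"]:
--         return "### Options Structure (10-77)\nMarket closed or no chains available.\n"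
--
--     options_output = raw_result["raw_output"]
--
--     # Parse 10-77 output - look for the OPTIONS STRUCTURE section
--     lines = options_output.split('\n')
--     section_lines = []
--     in_options_section = False
--
--     for line in lines:
--         # Start capturing at OPTIONS STRUCTURE header
--         if '=== OPTIONS STRUCTURE' in line:
--             in_options_section = True
--
--         if in_options_section:
--             section_lines.append(line)
--
--             # Stop at risk warning
--             if '[RISK WARNING]' in line:
--                 break
--
--     # If we found the OPTIONS STRUCTURE section, format it nicely
--     if section_lines and len(section_lines) > 1:
--         output = "### Options Structure (10-77)\n"
--         output += "\n".join(section_lines)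
--         return output + "\n"
--
--     # If no OPTIONS STRUCTURE found, show what we got
--     if options_output.strip():
--         return f"### Options Structure (10-77)\n\n{options_output}\n"
--
--     return "### Options Structure (10-77)\nMarket closed or no chains available.\n"
-- ===== SOURCE B (Python) =====
-- def format_options_structure_section(raw_result):
--     """Format 10-77 options structure section: find header/warning indices by
--     enumerate-comprehensions and slice, instead of a stateful flag-and-accumulate loop."""
--     hdr = "### Options Structure (10-77)\n"
--     closed = hdr + "Market closed or no chains available.\n"
--     if not raw_result:
--         return closed
--     err = raw_result.get("error")
--     if err:
--         return hdr + "[ERROR] " + err + "\n"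
--     out = raw_result.get("raw_output")
--     if not out:
--         return closed
--     lines = out.split('\n')
--     starts = [i for i, l in enumerate(lines) if '=== OPTIONS STRUCTURE' in l]
--     rest = lines[starts[0]:] if starts else []
--     stops = [j for j, l in enumerate(rest) if '[RISK WARNING]' in l]
--     section = rest[:stops[0] + 1] if stops else rest
--     if len(section) > 1:
--         return hdr + "\n".join(section) + "\n"
--     if out.strip():
--         return hdr + "\n" + out + "\n"
--     return closed
-- ===== Notes on version B (the rewrite author's own statement) =====
-- stated objective: simpler
-- what changed: Replaced A's stateful flag-and-accumulate loop with two enumerate-comprehensions that collect the indices of header and risk-warning lines, followed by slicing; guards use dict.get and the formatting fallbacks are unchanged.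
import Mathlib
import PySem

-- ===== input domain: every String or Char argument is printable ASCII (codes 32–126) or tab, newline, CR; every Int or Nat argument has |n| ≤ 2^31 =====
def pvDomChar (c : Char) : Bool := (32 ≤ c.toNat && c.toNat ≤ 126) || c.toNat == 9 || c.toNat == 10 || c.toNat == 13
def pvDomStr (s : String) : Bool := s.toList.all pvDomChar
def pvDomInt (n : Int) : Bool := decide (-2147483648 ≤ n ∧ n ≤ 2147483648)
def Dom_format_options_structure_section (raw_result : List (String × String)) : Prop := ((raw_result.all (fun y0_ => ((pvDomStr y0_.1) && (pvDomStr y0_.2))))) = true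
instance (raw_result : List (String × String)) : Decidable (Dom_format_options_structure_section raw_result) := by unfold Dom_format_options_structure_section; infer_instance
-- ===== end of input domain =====

-- B extracts the section via enumerate-comprehensions over the lines (index lists) and slicing,
-- instead of A's stateful flag-and-accumulate loop; simpler decomposition, same cost.

-- ===== PORT A =====
-- A's loop: 'for line in lines: if header in line: in_options_section = True; if in_options_section: append; if warning in line: break'
def foscLoopA : List String → Bool → List String → List String
  | [], _, acc => acc
  | l :: rest, inSec, acc =>
    let inSec' := inSec || PySem.Str.isIn "=== OPTIONS STRUCTURE" l
    if inSec' then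
      let acc' := acc ++ [l]
      if PySem.Str.isIn "[RISK WARNING]" l then acc' else foscLoopA rest inSec' acc'
    else foscLoopA rest inSec' acc

def format_options_structure_section (raw_result : List (String × String)) : String :=
  let d := PySem.Dict.mk raw_result
  if raw_result.isEmpty then
    "### Options Structure (10-77)\nMarket closed or no chains available.\n"
  else if (d.get? "error").isSome ∧ d.getD "error" "" ≠ "" then
    "### Options Structure (10-77)\n[ERROR] " ++ d.getD "error" "" ++ "\n"
  else if ¬ (d.get? "raw_output").isSome ∨ d.getD "raw_output" "" = "" then
    "### Options Structure (10-77)\nMarket closed or no chains available.\n"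
  else
    let options_output := d.getD "raw_output" ""
    let lines := (PySem.Str.split? options_output "\n").getD []  -- sep is the nonempty literal, so split? = some
    let section_lines := foscLoopA lines false []
    if section_lines ≠ [] ∧ section_lines.length > 1 then
      "### Options Structure (10-77)\n" ++ PySem.Str.join "\n" section_lines ++ "\n"
    else if PySem.Str.strip options_output ≠ "" then
      "### Options Structure (10-77)\n\n" ++ options_output ++ "\n"
    else
      "### Options Structure (10-77)\nMarket closed or no chains available.\n"

-- ===== PORT B =====
-- Python truthiness of `raw_result.get(k)`: None and "" are falsy
def foscTruthy : Option String → Bool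
  | none => false
  | some s => !(s == "")

-- '[i for i, l in enumerate(lines) if needle in l]'
def foscIdxs (needle : String) (lines : List String) : List Int :=
  (PySem.List.enumerate lines).filterMap
    (fun p => if PySem.Str.isIn needle p.2 then some p.1 else none)

-- 'rest = lines[starts[0]:] if starts else []; section = rest[:stops[0]+1] if stops else rest'
def foscSectionB (lines : List String) : List String :=
  let starts := foscIdxs "=== OPTIONS STRUCTURE" lines
  let rest := match starts with
    | [] => []
    | s :: _ => PySem.List.slice lines (some s) none
  let stops := foscIdxs "[RISK WARNING]" rest
  match stops with
  | [] => rest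
  | e :: _ => PySem.List.slice rest none (some (e + 1))

def format_options_structure_section_alt (raw_result : List (String × String)) : String :=
  let hdr := "### Options Structure (10-77)\n"
  let closed := hdr ++ "Market closed or no chains available.\n"
  if raw_result.isEmpty then closed
  else
    let d := PySem.Dict.mk raw_result
    let err := d.get? "error"
    if foscTruthy err then hdr ++ "[ERROR] " ++ err.getD "" ++ "\n"
    else
      let out := d.get? "raw_output"
      if foscTruthy out then
        let o := out.getD ""
        let lines := (PySem.Str.split? o "\n").getD []  -- sep is the nonempty literal, so split? = some
        let sec := foscSectionB lines
        if sec.length > 1 then hdr ++ PySem.Str.join "\n" sec ++ "\n"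
        else if PySem.Str.strip o ≠ "" then hdr ++ "\n" ++ o ++ "\n"
        else closed
      else closed

-- ===== PRECONDITION & SPEC =====
def Spec_format_options_structure_section (raw_result : List (String × String)) (out : String) : Prop := out = format_options_structure_section_alt raw_result
instance (raw_result : List (String × String)) (out : String) : Decidable (Spec_format_options_structure_section raw_result out) := by unfold Spec_format_options_structure_section; infer_instance

-- ===== CLAIM =====
def Claim_equal_format_options_structure_section : Prop := ∀ (raw_result : List (String × String)), Dom_format_options_structure_section raw_result → Spec_format_options_structure_section raw_result (format_options_structure_section raw_result)

-- ===== LEMMAS AND PROOFS =====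

-- proof-side helper: index of the first line containing needle (not used by either port)
def foscFind : List String → String → Option Nat
  | [], _ => none
  | l :: rest, needle =>
    if PySem.Str.isIn needle l then some 0 else (foscFind rest needle).map (· + 1)

-- proof-side helper: the lines A's loop collects once the flag is on
def foscWarnPfx : List String → List String
  | [] => []
  | l :: rest => l :: (if PySem.Str.isIn "[RISK WARNING]" l then [] else foscWarnPfx rest)

lemma foscTruthy_iff (o : Option String) : foscTruthy o = true ↔ (o.isSome ∧ o.getD "" ≠ "") := by
  cases o <;> simp [foscTruthy]

lemma foscIdxs_head (needle : String) (lines : List String) : ∀ s : Int,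
    (((PySem.List.enumerate lines s).filterMap
        (fun p => if PySem.Str.isIn needle p.2 then some p.1 else none)).head?)
      = (foscFind lines needle).map (fun k => s + (k : Int)) := by
  induction lines with
  | nil => intro s; simp [PySem.List.enumerate_nil, foscFind]
  | cons l rest ih =>
    intro s
    rw [PySem.List.enumerate_cons]
    simp only [List.filterMap_cons, foscFind]
    cases hh : PySem.Str.isIn needle l with
    | true => simp
    | false =>
      simp only [Bool.false_eq_true, if_false, ih (s + 1)]
      cases foscFind rest needle with
      | none => simp
      | some k => simp; ring

lemma foscLoopA_true (lines : List String) : ∀ acc, foscLoopA lines true acc = acc ++ foscWarnPfx lines := by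
  induction lines with
  | nil => intro acc; simp [foscLoopA, foscWarnPfx]
  | cons l rest ih =>
    intro acc
    simp only [foscLoopA, foscWarnPfx, Bool.true_or]
    cases hw : PySem.Str.isIn "[RISK WARNING]" l with
    | true => simp
    | false => simp [ih]

lemma foscWarnPfx_eq (lines : List String) :
    foscWarnPfx lines = match foscFind lines "[RISK WARNING]" with
      | none => lines
      | some e => lines.take (e + 1) := by
  induction lines with
  | nil => simp [foscWarnPfx, foscFind]
  | cons l rest ih =>
    simp only [foscWarnPfx, foscFind]
    cases hw : PySem.Str.isIn "[RISK WARNING]" l with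
    | true => simp
    | false =>
      simp only [Bool.false_eq_true, if_false, ih]
      cases hf : foscFind rest "[RISK WARNING]" with
      | none => simp
      | some e => simp [List.take_succ_cons]

lemma foscIdxs_nil_iff (needle : String) (lines : List String) :
    foscIdxs needle lines = [] ↔ foscFind lines needle = none := by
  have h := foscIdxs_head needle lines 0
  unfold foscIdxs
  constructor
  · intro he
    rw [he] at h
    cases hf : foscFind lines needle with
    | none => rfl
    | some k => rw [hf] at h; simp at h
  · intro hf
    rw [hf] at h
    simpa using List.head?_eq_none_iff.mp h

lemma foscIdxs_cons (needle : String) (lines : List String) (k : Nat)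
    (hf : foscFind lines needle = some k) :
    ∃ t, foscIdxs needle lines = ((k : Int)) :: t := by
  have h := foscIdxs_head needle lines 0
  rw [hf] at h
  unfold foscIdxs
  cases hi : (PySem.List.enumerate lines 0).filterMap
      (fun p => if PySem.Str.isIn needle p.2 then some p.1 else none) with
  | nil => rw [hi] at h; simp at h
  | cons a t =>
    rw [hi] at h
    simp at h
    exact ⟨t, by rw [h]⟩

lemma foscSectionB_eq (lines : List String) :
    foscSectionB lines = match foscFind lines "=== OPTIONS STRUCTURE" with
      | none => []
      | some s => foscWarnPfx (lines.drop s) := by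
  unfold foscSectionB
  cases hs : foscFind lines "=== OPTIONS STRUCTURE" with
  | none =>
    have h1 : foscIdxs "=== OPTIONS STRUCTURE" lines = [] := (foscIdxs_nil_iff _ _).mpr hs
    rw [h1]
    show (match foscIdxs "[RISK WARNING]" ([] : List String) with
      | [] => ([] : List String)
      | e :: _ => PySem.List.slice [] none (some (e + 1))) = []
    have h2 : foscIdxs "[RISK WARNING]" ([] : List String) = [] := by
      simp [foscIdxs, PySem.List.enumerate_nil]
    rw [h2]
  | some s =>
    obtain ⟨t, ht⟩ := foscIdxs_cons _ _ _ hs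
    rw [ht]
    have hslice : PySem.List.slice lines (some ((s : Nat) : Int)) none = lines.drop s :=
      PySem.List.slice_from_natCast lines s
    simp only [hslice, foscWarnPfx_eq]
    cases he : foscFind (lines.drop s) "[RISK WARNING]" with
    | none =>
      have h1 : foscIdxs "[RISK WARNING]" (lines.drop s) = [] := (foscIdxs_nil_iff _ _).mpr he
      rw [h1]
    | some e =>
      obtain ⟨t2, ht2⟩ := foscIdxs_cons _ _ _ he
      rw [ht2]
      show PySem.List.slice (lines.drop s) none (some ((e : Int) + 1)) = (lines.drop s).take (e + 1)
      have hc : ((e : Int) + 1) = (((e + 1 : Nat)) : Int) := by push_cast; ring_nf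
      rw [hc, PySem.List.slice_to_natCast]

lemma foscLoopA_eq_sectionB (lines : List String) : foscLoopA lines false [] = foscSectionB lines := by
  rw [foscSectionB_eq]
  induction lines with
  | nil => simp [foscLoopA, foscFind]
  | cons l rest ih =>
    cases hh : PySem.Str.isIn "=== OPTIONS STRUCTURE" l with
    | true =>
      have hA : foscLoopA (l :: rest) false [] = foscWarnPfx (l :: rest) := by
        simp only [foscLoopA, foscWarnPfx, hh, Bool.false_or, if_true, List.nil_append]
        cases hw : PySem.Str.isIn "[RISK WARNING]" l with
        | true => simp
        | false => simp [foscLoopA_true]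
      rw [hA]
      have h0 : foscFind (l :: rest) "=== OPTIONS STRUCTURE" = some 0 := by
        unfold foscFind
        rw [hh]
        simp
      rw [h0]
      simp
    | false =>
      have hA : foscLoopA (l :: rest) false [] = foscLoopA rest false [] := by
        simp only [foscLoopA, hh, Bool.false_or, Bool.false_eq_true, if_false]
      rw [hA, ih]
      simp only [foscFind, hh, Bool.false_eq_true, if_false]
      cases hf : foscFind rest "=== OPTIONS STRUCTURE" with
      | none => simp
      | some s => simp [List.drop_succ_cons]

lemma foscGate (xs : List String) : (xs ≠ [] ∧ xs.length > 1) ↔ xs.length > 1 := by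
  constructor
  · exact fun h => h.2
  · intro h
    refine ⟨?_, h⟩
    intro hnil
    simp [hnil] at h

-- ===== VERDICT =====
theorem format_options_structure_section_spec : Claim_equal_format_options_structure_section := by
  intro raw_result _
  show format_options_structure_section raw_result = format_options_structure_section_alt raw_result
  unfold format_options_structure_section format_options_structure_section_alt
  by_cases h0 : raw_result.isEmpty
  · rw [if_pos h0, if_pos h0]
    rfl
  · rw [if_neg h0, if_neg h0]
    by_cases h1 : ((PySem.Dict.mk raw_result).get? "error").isSome ∧ (PySem.Dict.mk raw_result).getD "error" "" ≠ ""
    · rw [if_pos h1]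
      have ht : foscTruthy ((PySem.Dict.mk raw_result).get? "error") = true :=
        (foscTruthy_iff _).mpr (by simpa [PySem.Dict.getD] using h1)
      rw [if_pos ht]
      simp [PySem.Dict.getD]
    · rw [if_neg h1]
      have ht : ¬ foscTruthy ((PySem.Dict.mk raw_result).get? "error") = true :=
        fun hc => h1 (by simpa [PySem.Dict.getD] using (foscTruthy_iff _).mp hc)
      rw [if_neg ht]
      by_cases h2 : ¬ ((PySem.Dict.mk raw_result).get? "raw_output").isSome ∨ (PySem.Dict.mk raw_result).getD "raw_output" "" = ""
      · rw [if_pos h2]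
        have hg : ¬ foscTruthy ((PySem.Dict.mk raw_result).get? "raw_output") = true := by
          intro hc
          have hti := (foscTruthy_iff _).mp hc
          rcases h2 with h2a | h2b
          · exact h2a hti.1
          · exact hti.2 (by simpa [PySem.Dict.getD] using h2b)
        rw [if_neg hg]
        rfl
      · rw [if_neg h2]
        have hg : foscTruthy ((PySem.Dict.mk raw_result).get? "raw_output") = true := by
          apply (foscTruthy_iff _).mpr
          rw [not_or, not_not] at h2
          exact ⟨h2.1, by simpa [PySem.Dict.getD] using h2.2⟩
        rw [if_pos hg]
        simp only [PySem.Dict.getD, foscLoopA_eq_sectionB, foscGate]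
        split_ifs <;> rfl
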